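-- pv_equiv track=rewrite | github.com/scochran3/public_notebooks | Coinbud/Models/social_text_processing.py | common_word_adjustments
-- ===== SOURCE A (Python) =====
-- def common_word_adjustments(text):
--
--     text = text.lower()
--     print (text)
--
--     changes = {
--         'rocket': 'moon',
--         'bullish': 'moon',
--         'bull': 'moon',
--     }
--
--     for k, v in changes.items():
--         text = text.replace(k, v)
--
--     return text
-- ===== SOURCE B (Python) =====
-- def common_word_adjustments(text):
--     text = text.lower()
--     print (text)
--
--     out = []
--     i = 0
--     n = len(text)
--     while i < n:
--         if text.startswith('rocket', i):
--             out.append('moon')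
--             i += 6
--         elif text.startswith('bullish', i):
--             out.append('moon')
--             i += 7
--         elif text.startswith('bull', i):
--             out.append('moon')
--             i += 4
--         else:
--             out.append(text[i])
--             i += 1
--     return ''.join(out)
-- ===== Notes on version B (the rewrite author's own statement) =====
-- stated objective: alternative
-- what changed: Replaces the three sequential full-text str.replace passes with a single left-to-right scan that matches 'rocket'/'bullish'/'bull' at each position (bullish checked before bull) and emits 'moon'; equivalent because 'moon' contains no character of any key, so one replacement can never create or destroy a later match.
import Mathlib
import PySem

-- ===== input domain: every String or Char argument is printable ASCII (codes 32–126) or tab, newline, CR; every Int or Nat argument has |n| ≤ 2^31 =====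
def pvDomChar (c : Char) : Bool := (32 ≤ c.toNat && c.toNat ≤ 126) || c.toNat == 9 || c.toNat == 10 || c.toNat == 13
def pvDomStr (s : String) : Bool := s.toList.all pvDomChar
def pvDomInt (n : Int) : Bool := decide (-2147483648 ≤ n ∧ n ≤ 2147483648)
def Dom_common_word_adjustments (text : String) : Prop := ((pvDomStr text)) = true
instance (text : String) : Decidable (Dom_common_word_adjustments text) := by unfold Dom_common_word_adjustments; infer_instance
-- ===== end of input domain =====

-- B replaces A's three sequential full-text replace passes with ONE left-to-right scan
-- ('bullish' checked before 'bull'); equivalence is about the return value only — both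
-- A and B also print the lowered text as a side effect, not modelled here.

-- ===== PORT A =====
-- A: text = text.lower(); then text = text.replace(k, 'moon') for k in ['rocket','bullish','bull']
def common_word_adjustments (text : String) : String :=
  let text := PySem.Str.lower text
  let text := PySem.Str.replace text "rocket" "moon"
  let text := PySem.Str.replace text "bullish" "moon"
  let text := PySem.Str.replace text "bull" "moon"
  text

-- ===== PORT B =====
-- B: single scan; at each position try startswith 'rocket' / 'bullish' / 'bull', emit 'moon'
-- and skip the key, else copy one character.
def cwaScan : List Char → List Char
  | [] => []
  | c :: t =>
    if ['r','o','c','k','e','t'].isPrefixOf (c :: t) then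
      ['m','o','o','n'] ++ cwaScan (List.drop 6 (c :: t))
    else if ['b','u','l','l','i','s','h'].isPrefixOf (c :: t) then
      ['m','o','o','n'] ++ cwaScan (List.drop 7 (c :: t))
    else if ['b','u','l','l'].isPrefixOf (c :: t) then
      ['m','o','o','n'] ++ cwaScan (List.drop 4 (c :: t))
    else c :: cwaScan t
termination_by l => l.length
decreasing_by all_goals (simp; try omega)

def common_word_adjustments_alt (text : String) : String :=
  String.ofList (cwaScan (PySem.Chars.lower text.toList))

-- ===== PRECONDITION & SPEC =====
def Spec_common_word_adjustments (text : String) (out : String) : Prop := out = common_word_adjustments_alt text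
instance (text : String) (out : String) : Decidable (Spec_common_word_adjustments text out) := by unfold Spec_common_word_adjustments; infer_instance

-- ===== CLAIM (what is proved, stated in full; the proofs are below) =====
def Claim_equal_common_word_adjustments : Prop := ∀ (text : String), Dom_common_word_adjustments text → Spec_common_word_adjustments text (common_word_adjustments text)

-- ===== LEMMAS AND PROOFS =====

-- single-pattern leftmost-replace recursors, one per key
def repR : List Char → List Char
  | [] => []
  | c :: t =>
    if ['r','o','c','k','e','t'].isPrefixOf (c :: t) then
      ['m','o','o','n'] ++ repR (List.drop 6 (c :: t))
    else c :: repR t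
termination_by l => l.length
decreasing_by all_goals (simp; try omega)

def repBI : List Char → List Char
  | [] => []
  | c :: t =>
    if ['b','u','l','l','i','s','h'].isPrefixOf (c :: t) then
      ['m','o','o','n'] ++ repBI (List.drop 7 (c :: t))
    else c :: repBI t
termination_by l => l.length
decreasing_by all_goals (simp; try omega)

def repB : List Char → List Char
  | [] => []
  | c :: t =>
    if ['b','u','l','l'].isPrefixOf (c :: t) then
      ['m','o','o','n'] ++ repB (List.drop 4 (c :: t))
    else c :: repB t
termination_by l => l.length
decreasing_by all_goals (simp; try omega)

-- PySem.Chars.replace.go with enough fuel computes any f satisfying the step equations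
lemma go_spec (old new : List Char) (f : List Char → List Char)
    (hne : old ≠ [])
    (h0 : f [] = [])
    (hstep : ∀ c t, f (c :: t) =
      if old.isPrefixOf (c :: t) then new ++ f (List.drop old.length (c :: t)) else c :: f t) :
    ∀ fuel l acc, l.length ≤ fuel →
      PySem.Chars.replace.go old new fuel l acc = acc.reverse ++ f l := by
  intro fuel
  induction fuel with
  | zero =>
    intro l acc hl
    have : l = [] := List.eq_nil_of_length_eq_zero (Nat.le_zero.mp hl)
    subst this
    simp [PySem.Chars.replace.go, h0]
  | succ n ih =>
    intro l acc hl
    cases l with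
    | nil => simp [PySem.Chars.replace.go, h0]
    | cons c t =>
      rw [PySem.Chars.replace.go]
      by_cases hp : old.isPrefixOf (c :: t) = true
      · rw [if_pos hp]
        have hol : 1 ≤ old.length := by
          cases old with
          | nil => exact absurd rfl hne
          | cons _ _ => simp
        have hlen : (List.drop old.length (c :: t)).length ≤ n := by
          simp only [List.length_drop, List.length_cons] at *
          omega
        rw [ih _ _ hlen, hstep, if_pos hp]
        simp
      · rw [if_neg hp]
        have hlen : t.length ≤ n := by simp at hl; omega
        rw [ih _ _ hlen, hstep, if_neg hp]
        simp

lemma replace_eq_f (old new : List Char) (f : List Char → List Char)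
    (hne : old ≠ [])
    (h0 : f [] = [])
    (hstep : ∀ c t, f (c :: t) =
      if old.isPrefixOf (c :: t) then new ++ f (List.drop old.length (c :: t)) else c :: f t)
    (l : List Char) : PySem.Chars.replace l old new = f l := by
  have : old.isEmpty = false := by cases old with
    | nil => exact absurd rfl hne
    | cons _ _ => rfl
  rw [PySem.Chars.replace, this]
  simpa using go_spec old new f hne h0 hstep l.length l [] (le_refl _)

lemma replace_rocket (l : List Char) :
    PySem.Chars.replace l ['r','o','c','k','e','t'] ['m','o','o','n'] = repR l := by
  refine replace_eq_f _ _ _ (by simp) (by rw [repR]) (fun c t => ?_) l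
  rw [repR]; simp

lemma replace_bullish (l : List Char) :
    PySem.Chars.replace l ['b','u','l','l','i','s','h'] ['m','o','o','n'] = repBI l := by
  refine replace_eq_f _ _ _ (by simp) (by rw [repBI]) (fun c t => ?_) l
  rw [repBI]; simp

lemma replace_bull (l : List Char) :
    PySem.Chars.replace l ['b','u','l','l'] ['m','o','o','n'] = repB l := by
  refine replace_eq_f _ _ _ (by simp) (by rw [repB]) (fun c t => ?_) l
  rw [repB]; simp

-- a step past a character that cannot start the key
lemma repR_cons_ne (c : Char) (t : List Char) (h : c ≠ 'r') : repR (c :: t) = c :: repR t := by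
  rw [repR, if_neg]
  simp only [List.isPrefixOf_iff_prefix, List.cons_prefix_cons, not_and]
  intro h'
  exact absurd h'.symm h

lemma repBI_cons_ne (c : Char) (t : List Char) (h : c ≠ 'b') : repBI (c :: t) = c :: repBI t := by
  rw [repBI, if_neg]
  simp only [List.isPrefixOf_iff_prefix, List.cons_prefix_cons, not_and]
  intro h'
  exact absurd h'.symm h

lemma repB_cons_ne (c : Char) (t : List Char) (h : c ≠ 'b') : repB (c :: t) = c :: repB t := by
  rw [repB, if_neg]
  simp only [List.isPrefixOf_iff_prefix, List.cons_prefix_cons, not_and]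
  intro h'
  exact absurd h'.symm h

-- pushing 'moon' through the later passes
lemma repBI_moon (z : List Char) : repBI (['m','o','o','n'] ++ z) = ['m','o','o','n'] ++ repBI z := by
  simp [repBI_cons_ne]

lemma repB_moon (z : List Char) : repB (['m','o','o','n'] ++ z) = ['m','o','o','n'] ++ repB z := by
  simp [repB_cons_ne]

-- a replacement pass creates no new 'm'-free prefixes
lemma repR_prefix : ∀ (l p : List Char), 'm' ∉ p → p <+: repR l → p <+: l := by
  intro l
  induction l using repR.induct with
  | case1 =>
    intro p _
    rw [repR]; exact id
  | case2 c t hp ih =>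
    intro p hm
    rw [repR, if_pos hp]
    intro hpre
    cases p with
    | nil => exact List.nil_prefix
    | cons q p' =>
      simp only [List.cons_append, List.nil_append] at hpre
      rw [List.cons_prefix_cons] at hpre
      have : 'm' ∈ q :: p' := by rw [hpre.1]; simp
      exact absurd this hm
  | case3 c t hp ih =>
    intro p hm
    rw [repR, if_neg hp]
    intro hpre
    cases p with
    | nil => exact List.nil_prefix
    | cons q p' =>
      rw [List.cons_prefix_cons] at hpre ⊢
      simp at hm
      exact ⟨hpre.1, ih p' hm.2 hpre.2⟩

lemma repBI_prefix : ∀ (l p : List Char), 'm' ∉ p → p <+: repBI l → p <+: l := by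
  intro l
  induction l using repBI.induct with
  | case1 =>
    intro p _
    rw [repBI]; exact id
  | case2 c t hp ih =>
    intro p hm
    rw [repBI, if_pos hp]
    intro hpre
    cases p with
    | nil => exact List.nil_prefix
    | cons q p' =>
      simp only [List.cons_append, List.nil_append] at hpre
      rw [List.cons_prefix_cons] at hpre
      have : 'm' ∈ q :: p' := by rw [hpre.1]; simp
      exact absurd this hm
  | case3 c t hp ih =>
    intro p hm
    rw [repBI, if_neg hp]
    intro hpre
    cases p with
    | nil => exact List.nil_prefix
    | cons q p' =>
      rw [List.cons_prefix_cons] at hpre ⊢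
      simp at hm
      exact ⟨hpre.1, ih p' hm.2 hpre.2⟩

-- the heart: three sequential passes equal the single scan
lemma three_eq_scan : ∀ l, repB (repBI (repR l)) = cwaScan l := by
  intro l
  induction l using cwaScan.induct with
  | case1 => simp [repR, repBI, repB, cwaScan]
  | case2 c t hp ih =>
    rw [repR, if_pos hp, repBI_moon, repB_moon, ih, cwaScan, if_pos hp]
  | case3 c t hp1 hp ih =>
    obtain ⟨x, hx⟩ := List.isPrefixOf_iff_prefix.mp hp
    have hx' : c :: t = 'b'::'u'::'l'::'l'::'i'::'s'::'h'::x := hx.symm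
    injection hx' with hc ht
    subst hc; subst ht
    rw [cwaScan, if_neg hp1, if_pos hp]
    have hr : repR ('b'::'u'::'l'::'l'::'i'::'s'::'h'::x) = 'b'::'u'::'l'::'l'::'i'::'s'::'h':: repR x := by
      simp [repR_cons_ne]
    have hbi : repBI ('b'::'u'::'l'::'l'::'i'::'s'::'h':: repR x) = ['m','o','o','n'] ++ repBI (repR x) := by
      rw [repBI, if_pos (by rw [List.isPrefixOf_iff_prefix]; exact ⟨repR x, rfl⟩)]
      simp
    have ih' : repB (repBI (repR x)) = cwaScan x := ih
    rw [hr, hbi, repB_moon]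
    exact congrArg (['m','o','o','n'] ++ ·) ih'
  | case4 c t hp1 hp2 hp ih =>
    obtain ⟨x, hx⟩ := List.isPrefixOf_iff_prefix.mp hp
    have hx' : c :: t = 'b'::'u'::'l'::'l'::x := hx.symm
    injection hx' with hc ht
    subst hc; subst ht
    rw [cwaScan, if_neg hp1, if_neg hp2, if_pos hp]
    have hr : repR ('b'::'u'::'l'::'l'::x) = 'b'::'u'::'l'::'l':: repR x := by
      simp [repR_cons_ne]
    have hnish : ¬ (['i','s','h'] <+: repR x) := by
      intro h
      have h5 := repR_prefix x ['i','s','h'] (by decide) h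
      apply hp2
      rw [List.isPrefixOf_iff_prefix]
      simpa [List.cons_prefix_cons] using h5
    have hbi : repBI ('b'::'u'::'l'::'l':: repR x) = 'b'::'u'::'l'::'l':: repBI (repR x) := by
      rw [repBI, if_neg]
      · simp [repBI_cons_ne]
      · simp only [List.isPrefixOf_iff_prefix, List.cons_prefix_cons]
        rintro ⟨-, -, -, -, hb⟩
        exact hnish hb
    have ih' : repB (repBI (repR x)) = cwaScan x := ih
    rw [hr, hbi, repB, if_pos (by rw [List.isPrefixOf_iff_prefix]; exact ⟨repBI (repR x), rfl⟩)]
    exact congrArg (['m','o','o','n'] ++ ·) ih'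
  | case5 c t hp1 hp2 hp3 ih =>
    rw [cwaScan, if_neg hp1, if_neg hp2, if_neg hp3]
    rw [repR, if_neg hp1]
    have h2 : repBI (c :: repR t) = c :: repBI (repR t) := by
      rw [repBI, if_neg]
      simp only [List.isPrefixOf_iff_prefix, List.cons_prefix_cons, not_and]
      intro hc hb
      apply hp2
      rw [List.isPrefixOf_iff_prefix, ← hc, List.cons_prefix_cons]
      exact ⟨rfl, repR_prefix t ['u','l','l','i','s','h'] (by decide) hb⟩
    have h3 : repB (c :: repBI (repR t)) = c :: repB (repBI (repR t)) := by
      rw [repB, if_neg]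
      simp only [List.isPrefixOf_iff_prefix, List.cons_prefix_cons, not_and]
      intro hc hb
      have h4 := repBI_prefix (repR t) ['u','l','l'] (by decide) hb
      have h5 := repR_prefix t ['u','l','l'] (by decide) h4
      apply hp3
      rw [List.isPrefixOf_iff_prefix, ← hc, List.cons_prefix_cons]
      exact ⟨rfl, h5⟩
    rw [h2, h3, ih]

-- ===== VERDICT (by name: the statement is the Claim_ definition above) =====
theorem common_word_adjustments_spec : Claim_equal_common_word_adjustments := by
  intro text _
  unfold Spec_common_word_adjustments common_word_adjustments common_word_adjustments_alt
  simp only [PySem.Str.replace, String.toList_ofList]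
  rw [show (PySem.Str.lower text).toList = PySem.Chars.lower text.toList from PySem.Str.toList_lower text]
  rw [show ("rocket" : String).toList = ['r','o','c','k','e','t'] from rfl,
      show ("bullish" : String).toList = ['b','u','l','l','i','s','h'] from rfl,
      show ("bull" : String).toList = ['b','u','l','l'] from rfl,
      show ("moon" : String).toList = ['m','o','o','n'] from rfl]
  rw [replace_rocket, replace_bullish, replace_bull, three_eq_scan]
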